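-- pv_equiv track=rewrite | github.com/aetherwizard/Nuclear-Binding-Length | calibrate_holonomy.py | get_shell_occupancy
-- ===== SOURCE A (Python) =====
-- def get_shell_occupancy(nucleon_count: int):
--     """
--     Returns (S_dom, occupancy_dict) where occupancy_dict = {s: n_s}
--     Shell capacities follow the holonomy rule:
--         s = 1 : capacity = 2
--         s ≥ 2 : capacity = 4*s - 2
--     Cumulative: N_≤S = 2 S^2
--     """
--     if nucleon_count <= 0:
--         return 0, {}
--
--     occupancy = {}
--     remaining = nucleon_count
--     s = 1
--     while remaining > 0:
--         cap = 2 if s == 1 else 4*s - 2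
--         fill = min(cap, remaining)
--         occupancy[s] = fill
--         remaining -= fill
--         s += 1
--
--     S = max(occupancy.keys()) if occupancy else 0
--     return S, occupancy
-- ===== SOURCE B (Python) =====
-- def _isqrt(n):
--     # integer square root by Newton's method (no floats); exact floor sqrt
--     if n <= 1:
--         return n
--     guess = 1 << ((n.bit_length() - 1) // 2 + 1)
--     while True:
--         nxt = (guess + n // guess) // 2
--         if nxt < guess:
--             guess = nxt
--         else:
--             return guess
--
--
-- def get_shell_occupancy(nucleon_count: int):
--     if nucleon_count <= 0:
--         return 0, {}
--     # m = number of completely filled shells: largest m with 2*m*m <= nucleon_count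
--     m = _isqrt(nucleon_count // 2)
--     occupancy = {s: (2 if s == 1 else 4 * s - 2) for s in range(1, m + 1)}
--     remainder = nucleon_count - 2 * m * m
--     if remainder > 0:
--         occupancy[m + 1] = remainder
--         return m + 1, occupancy
--     return m, occupancy
-- ===== Notes on version B (the rewrite author's own statement) =====
-- stated objective: alternative
-- what changed: B computes the number of completely filled shells in closed form (m = isqrt(nucleon_count//2), the largest m with 2*m*m <= nucleon_count), builds the occupancy dict by a comprehension assigning each full shell its capacity plus one partial shell from the arithmetic remainder, and returns the top shell index directly instead of running A's while-loop that subtracts capacities and then takes max over the keys.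
import Mathlib
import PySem

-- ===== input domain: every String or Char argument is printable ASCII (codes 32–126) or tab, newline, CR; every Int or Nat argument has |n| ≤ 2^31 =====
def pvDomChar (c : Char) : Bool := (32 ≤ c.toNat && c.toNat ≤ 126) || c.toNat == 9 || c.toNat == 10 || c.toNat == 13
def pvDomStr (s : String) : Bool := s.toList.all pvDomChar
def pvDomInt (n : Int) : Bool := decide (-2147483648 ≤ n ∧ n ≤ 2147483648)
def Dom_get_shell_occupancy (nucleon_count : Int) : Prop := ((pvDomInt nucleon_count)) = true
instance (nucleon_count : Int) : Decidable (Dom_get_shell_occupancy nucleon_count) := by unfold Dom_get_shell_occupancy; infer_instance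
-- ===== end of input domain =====

-- B derives the shell boundary in closed form (m = isqrt(n//2)) instead of A's capacity-subtracting loop; same values everywhere.

-- ===== PORT A =====
-- The while loop of A, fuel = initial remaining (each iteration removes at least 1 nucleon,
-- since s starts at 1 and never decreases, so capacities are ≥ 2).  Keys s strictly increase,
-- so dict assignment occupancy[s] = fill is an append to the association list (exact).
def pvALoop (fuel : Nat) (remaining s : Int) (occ : List (Int × Int)) : List (Int × Int) :=
  match fuel with
  | 0 => occ
  | f + 1 =>
    if remaining > 0 then
      let cap : Int := if s = 1 then 2 else 4 * s - 2
      let fill := min cap remaining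
      pvALoop f (remaining - fill) (s + 1) (occ ++ [(s, fill)])
    else occ

def get_shell_occupancy (nucleon_count : Int) : Int × (List (Int × Int)) :=
  if nucleon_count ≤ 0 then (0, [])
  else
    let occ := pvALoop nucleon_count.toNat nucleon_count 1 []
    -- max(occupancy.keys()) if occupancy else 0 ; the .getD 0 is unreachable on a nonempty list
    let S : Int := if occ.isEmpty then 0
                   else (PySem.List.max? (occ.map Prod.fst) (fun y => y)).getD 0
    (S, occ)

-- ===== PORT B =====
-- Source B's _isqrt is a verbatim transcription of Batteries' Nat.sqrt (same initial guess
-- 1 <<< (log2 n / 2 + 1), same Newton step, same stopping rule), so it is ported as Nat.sqrt.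
def get_shell_occupancy_alt (nucleon_count : Int) : Int × (List (Int × Int)) :=
  if nucleon_count ≤ 0 then (0, [])
  else
    let m : Int := (Nat.sqrt (PySem.Int.floordiv nucleon_count 2).toNat : Nat)
    let occ := (PySem.List.pyRange 1 (m + 1) 1).map
      (fun s => (s, if s = 1 then (2 : Int) else 4 * s - 2))
    let remainder := nucleon_count - 2 * m * m
    if remainder > 0 then (m + 1, occ ++ [(m + 1, remainder)]) else (m, occ)

-- ===== PRECONDITION & SPEC =====
def Spec_get_shell_occupancy (nucleon_count : Int) (out : Int × (List (Int × Int))) : Prop := out = get_shell_occupancy_alt nucleon_count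
instance (nucleon_count : Int) (out : Int × (List (Int × Int))) : Decidable (Spec_get_shell_occupancy nucleon_count out) := by unfold Spec_get_shell_occupancy; infer_instance

-- ===== CLAIM (what is proved, stated in full; the proofs are below) =====
def Claim_equal_get_shell_occupancy : Prop := ∀ (nucleon_count : Int), Dom_get_shell_occupancy nucleon_count → Spec_get_shell_occupancy nucleon_count (get_shell_occupancy nucleon_count)

-- ===== LEMMAS AND PROOFS =====

-- The list A's loop appends after having completely filled shells 1..k:
-- d further full shells, then (possibly) one partial shell.
def shellTail (n : Int) : Nat → Nat → List (Int × Int)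
  | k, 0 => if n - 2 * (k : Int) * k > 0 then [((k : Int) + 1, n - 2 * (k : Int) * k)] else []
  | k, d + 1 => (((k : Int) + 1, 4 * (k : Int) + 2)) :: shellTail n (k + 1) d

lemma pvALoop_nonpos (f : Nat) (r s : Int) (occ : List (Int × Int)) (h : ¬ r > 0) :
    pvALoop f r s occ = occ := by
  cases f <;> simp [pvALoop, h]

lemma pv_foldl_max_le (t : List Int) : ∀ (x b : Int), x ≤ b → (∀ y ∈ t, y ≤ b) →
    t.foldl max x ≤ b := by
  induction t with
  | nil => intro x b hx _; simpa using hx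
  | cons a t ih =>
    intro x b hx h
    simp only [List.foldl_cons]
    exact ih _ _ (max_le hx (h a (by simp))) (fun y hy => h y (by simp [hy]))

lemma pv_max?_snoc (l : List Int) (b : Int) (h : ∀ y ∈ l, y ≤ b) :
    PySem.List.max? (l ++ [b]) (fun y => y) = some b := by
  cases l with
  | nil => simpa using PySem.List.max?_id_cons b []
  | cons x t =>
    have := PySem.List.max?_id_cons x (t ++ [b])
    rw [List.cons_append] at *
    rw [this]
    have hle : t.foldl max x ≤ b :=
      pv_foldl_max_le t x b (h x (by simp)) (fun y hy => h y (by simp [hy]))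
    simp [List.foldl_append, max_eq_right hle]

lemma pvALoop_eq (n : Int) (m : Nat) (h1 : 2 * (m : Int) * m ≤ n)
    (h2 : n < 2 * ((m : Int) + 1) * ((m : Int) + 1)) :
    ∀ (d k : Nat) (occ : List (Int × Int)) (fuel : Nat), k + d = m → d + 1 ≤ fuel →
      pvALoop fuel (n - 2 * (k : Int) * k) ((k : Int) + 1) occ = occ ++ shellTail n k d := by
  intro d
  induction d with
  | zero =>
    intro k occ fuel hk hf
    obtain ⟨f, rfl⟩ : ∃ f, fuel = f + 1 := ⟨fuel - 1, by omega⟩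
    have hkm : k = m := by omega
    subst hkm
    by_cases hr : n - 2 * (k : Int) * k > 0
    · have hcap : (if (k : Int) + 1 = 1 then (2 : Int) else 4 * ((k : Int) + 1) - 2)
          = 4 * (k : Int) + 2 := by split_ifs with h <;> omega
      have hrle : n - 2 * (k : Int) * k ≤ 4 * (k : Int) + 2 := by nlinarith
      simp only [pvALoop]
      rw [if_pos hr, hcap, min_eq_right hrle, sub_self]
      rw [pvALoop_nonpos _ _ _ _ (by omega)]
      simp only [shellTail]
      rw [if_pos hr]
    · rw [pvALoop_nonpos _ _ _ _ hr]
      simp only [shellTail]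
      rw [if_neg hr]
      simp
  | succ d ih =>
    intro k occ fuel hk hf
    obtain ⟨f, rfl⟩ : ∃ f, fuel = f + 1 := ⟨fuel - 1, by omega⟩
    have hkm : (k : Int) + 1 ≤ (m : Int) := by exact_mod_cast (by omega : (k + 1 : Nat) ≤ m)
    have hrge : 4 * (k : Int) + 2 ≤ n - 2 * (k : Int) * k := by nlinarith
    have hr : n - 2 * (k : Int) * k > 0 := by omega
    have hcap : (if (k : Int) + 1 = 1 then (2 : Int) else 4 * ((k : Int) + 1) - 2)
        = 4 * (k : Int) + 2 := by split_ifs with h <;> omega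
    have hrem : n - 2 * (k : Int) * k - (4 * (k : Int) + 2)
        = n - 2 * ((k + 1 : Nat) : Int) * ((k + 1 : Nat) : Int) := by push_cast; ring
    have hs : (k : Int) + 1 + 1 = ((k + 1 : Nat) : Int) + 1 := by push_cast; ring
    simp only [pvALoop]
    rw [if_pos hr, hcap, min_eq_left hrge, hrem, hs,
      ih (k + 1) (occ ++ [((k : Int) + 1, 4 * (k : Int) + 2)]) f (by omega) (by omega)]
    simp [shellTail]

lemma shellTail_flat (n : Int) : ∀ (d k : Nat),
    shellTail n k d
      = ((List.range d).map (fun (i : Nat) => ((k : Int) + (i : Int) + 1, 4 * ((k : Int) + (i : Int)) + 2)))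
        ++ (if n - 2 * ((k : Int) + (d : Int)) * ((k : Int) + (d : Int)) > 0
            then [((k : Int) + (d : Int) + 1, n - 2 * ((k : Int) + (d : Int)) * ((k : Int) + (d : Int)))]
            else []) := by
  intro d
  induction d with
  | zero => intro k; simp [shellTail]
  | succ d ih =>
    intro k
    simp only [shellTail, ih (k + 1), List.range_succ_eq_map, List.map_cons, List.map_map,
      List.cons_append, gt_iff_lt, sub_pos]
    push_cast
    ring_nf
    congr 2
    refine List.map_congr_left (fun i _ => ?_)
    simp only [Function.comp_apply]
    push_cast
    ring_nf

-- ===== VERDICT (by name: the statement is the Claim_ definition above) =====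
theorem get_shell_occupancy_spec : Claim_equal_get_shell_occupancy := by
  intro n _
  unfold Spec_get_shell_occupancy get_shell_occupancy get_shell_occupancy_alt
  by_cases hn : n ≤ 0
  · simp [hn]
  · rw [if_neg hn, if_neg hn]
    have hn0 : 0 < n := by omega
    have hfd : (PySem.Int.floordiv n 2).toNat = n.toNat / 2 := by
      simp only [PySem.Int.floordiv]
      rw [Int.fdiv_eq_ediv]
      omega
    rw [hfd]
    obtain ⟨m, hmdef⟩ : ∃ m, m = Nat.sqrt (n.toNat / 2) := ⟨_, rfl⟩
    rw [← hmdef]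
    have hs1 : m * m ≤ n.toNat / 2 := by
      rw [hmdef]; simpa [pow_two] using Nat.sqrt_le' (n.toNat / 2)
    have hs2 : n.toNat / 2 < (m + 1) * (m + 1) := by
      rw [hmdef]; simpa [pow_two, Nat.succ_eq_add_one] using Nat.lt_succ_sqrt' (n.toNat / 2)
    have hm1 : 2 * (m : Int) * m ≤ n := by
      have h : 2 * (m * m) ≤ n.toNat := by omega
      have h2 : ((2 * (m * m) : Nat) : Int) ≤ (n.toNat : Int) := by exact_mod_cast h
      push_cast at h2
      rw [Int.toNat_of_nonneg hn0.le] at h2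
      nlinarith [h2]
    have hm2 : n < 2 * ((m : Int) + 1) * ((m : Int) + 1) := by
      have h : n.toNat < 2 * ((m + 1) * (m + 1)) := by omega
      have h2 : (n.toNat : Int) < ((2 * ((m + 1) * (m + 1)) : Nat) : Int) := by exact_mod_cast h
      push_cast at h2
      rw [Int.toNat_of_nonneg hn0.le] at h2
      nlinarith [h2]
    have hfuel : m + 1 ≤ n.toNat := by
      rcases Nat.eq_zero_or_pos m with hm0 | hm0
      · omega
      · have : m + 1 ≤ 2 * (m * m) := by nlinarith
        omega
    have hA : pvALoop n.toNat n 1 [] = shellTail n 0 m := by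
      have h := pvALoop_eq n m hm1 hm2 m 0 [] n.toNat (by omega) (by omega)
      simpa using h
    have hLS : shellTail n 0 m
        = (List.range m).map (fun (i : Nat) => ((i : Int) + 1, 4 * (i : Int) + 2))
          ++ (if n - 2 * (m : Int) * m > 0 then [((m : Int) + 1, n - 2 * (m : Int) * m)] else []) := by
      simpa using shellTail_flat n m 0
    have hB : (PySem.List.pyRange 1 ((m : Int) + 1) 1).map
          (fun s => (s, if s = 1 then (2 : Int) else 4 * s - 2))
        = (List.range m).map (fun (i : Nat) => ((i : Int) + 1, 4 * (i : Int) + 2)) := by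
      rw [PySem.List.pyRange_one]
      have ht : (((m : Int) + 1) - 1).toNat = m := by omega
      rw [ht, List.map_map]
      refine List.map_congr_left (fun i _ => ?_)
      simp only [Function.comp_apply, Prod.mk.injEq]
      split_ifs with h
      · constructor <;> omega
      · constructor <;> omega
    simp only [hA, hLS, hB]
    by_cases hrem : n - 2 * (m : Int) * m > 0
    · rw [if_pos hrem, if_pos hrem]
      have hkeys : ∀ y ∈ ((List.range m).map
          (fun (i : Nat) => ((i : Int) + 1, 4 * (i : Int) + 2))).map Prod.fst, y ≤ (m : Int) + 1 := by
        intro y hy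
        simp only [List.map_map, List.mem_map, List.mem_range, Function.comp_apply] at hy
        obtain ⟨i, hi, rfl⟩ := hy
        omega
      have hmax := pv_max?_snoc _ ((m : Int) + 1) hkeys
      simp only [List.map_append, List.map_cons, List.map_nil, List.map_map] at *
      simp [hmax]
    · rw [if_neg hrem, if_neg hrem]
      have hm0 : 0 < m := by
        rcases Nat.eq_zero_or_pos m with h0 | h0
        · exfalso; apply hrem; rw [h0]; push_cast; omega
        · exact h0
      obtain ⟨m', rfl⟩ : ∃ m', m = m' + 1 := ⟨m - 1, by omega⟩
      rw [List.range_succ, List.map_append]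
      have hkeys : ∀ y ∈ (((List.range m').map
          (fun (i : Nat) => ((i : Int) + 1, 4 * (i : Int) + 2))).map Prod.fst), y ≤ (m' : Int) + 1 := by
        intro y hy
        simp only [List.map_map, List.mem_map, List.mem_range, Function.comp_apply] at hy
        obtain ⟨i, hi, rfl⟩ := hy
        omega
      have hmax := pv_max?_snoc _ ((m' : Int) + 1) hkeys
      simp only [List.map_append, List.map_cons, List.map_nil, List.map_map] at *
      simp [hmax]
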